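-- pv_equiv track=rewrite | github.com/paradigm72/paradigm-euler | lib/calendar.py | getFirstDaysInMonth
-- ===== SOURCE A (Python) =====
-- def isLeapYear(year):
--     if ((year % 4) == 0):
--         if ((year % 100) == 0):
--             if ((year % 400) == 0):
--                 return True;
--             return False;
--         return True;
--     return False;
--
-- def daysInMonth(month, year):
--     if (month == 1) or (month == 3) or (month == 5) or (month == 7) or (month == 8) or (month == 10) or (month == 12):
--         return 31
--     if month == 2:
--         if isLeapYear(year):
--             return 29
--         return 28
--     return 30
--
-- def getFirstDaysInMonth(year):
--     dayNumInMonth = 0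
--     monthNum = 1
--     dayNums = [1]   # start with Jan. 1 as a first day of a month
--     daysInYear = 366 if isLeapYear(year) else 365
--
--     for dayNumInYear in range(1, daysInYear):
--         dayNumInMonth = dayNumInMonth + 1
--         if dayNumInMonth > daysInMonth(monthNum, year):
--             monthNum = monthNum + 1
--             dayNumInMonth = 1
--             dayNums.append(dayNumInYear)
--     return dayNums
-- ===== SOURCE B (Python) =====
-- def isLeapYear(year):
--     if ((year % 4) == 0):
--         if ((year % 100) == 0):
--             if ((year % 400) == 0):
--                 return True;
--             return False;
--         return True;
--     return False;
--
-- def daysInMonth(month, year):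
--     if (month == 1) or (month == 3) or (month == 5) or (month == 7) or (month == 8) or (month == 10) or (month == 12):
--         return 31
--     if month == 2:
--         if isLeapYear(year):
--             return 29
--         return 28
--     return 30
--
-- def getFirstDaysInMonth(year):
--     dayNums = [1]
--     cum = 1
--     for m in range(1, 12):
--         cum += daysInMonth(m, year)
--         dayNums.append(cum)
--     return dayNums
-- ===== Notes on version B (the rewrite author's own statement) =====
-- stated objective: simpler
-- what changed: Replaces A's day-by-day scan of every day of the year (with a reset-on-overflow within-month counter) by a short loop over the months that maintains a cumulative day-of-year total.
import Mathlib
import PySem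

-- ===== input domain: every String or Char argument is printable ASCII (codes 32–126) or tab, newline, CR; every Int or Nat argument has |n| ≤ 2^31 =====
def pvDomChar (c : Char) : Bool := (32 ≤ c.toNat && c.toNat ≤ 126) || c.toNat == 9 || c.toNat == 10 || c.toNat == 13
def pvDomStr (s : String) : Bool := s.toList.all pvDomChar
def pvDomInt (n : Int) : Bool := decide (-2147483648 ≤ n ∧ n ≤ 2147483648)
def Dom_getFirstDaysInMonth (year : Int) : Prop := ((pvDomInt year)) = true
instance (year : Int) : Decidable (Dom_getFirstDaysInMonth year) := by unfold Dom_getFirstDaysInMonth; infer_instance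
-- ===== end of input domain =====

-- B replaces A's day-by-day scan of the whole year (reset-on-overflow counter) by a short
-- loop over the months keeping a cumulative day-of-year total (objective: simpler).

-- ===== PORT A =====
def isLeapYear (year : Int) : Bool :=
  if PySem.Int.mod year 4 = 0 then
    if PySem.Int.mod year 100 = 0 then
      if PySem.Int.mod year 400 = 0 then true else false
    else true
  else false

def daysInMonth (month year : Int) : Int :=
  if month = 1 ∨ month = 3 ∨ month = 5 ∨ month = 7 ∨ month = 8 ∨ month = 10 ∨ month = 12 then 31
  else if month = 2 then (if isLeapYear year then 29 else 28)
  else 30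

def getFirstDaysInMonth (year : Int) : List Int :=
  let daysInYear : Int := if isLeapYear year then 366 else 365
  let s := (PySem.List.pyRange 1 daysInYear 1).foldl
    (fun (st : Int × Int × List Int) dayNumInYear =>
      let dayNumInMonth := st.1 + 1
      if dayNumInMonth > daysInMonth st.2.1 year then
        (1, st.2.1 + 1, st.2.2 ++ [dayNumInYear])
      else
        (dayNumInMonth, st.2.1, st.2.2))
    (0, 1, [1])
  s.2.2

-- ===== PORT B =====
def getFirstDaysInMonth_alt (year : Int) : List Int :=
  let s := (PySem.List.pyRange 1 12 1).foldl
    (fun (st : List Int × Int) m =>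
      let cum := st.2 + daysInMonth m year
      (st.1 ++ [cum], cum))
    ([1], 1)
  s.1

-- ===== PRECONDITION & SPEC =====
def Spec_getFirstDaysInMonth (year : Int) (out : List Int) : Prop := out = getFirstDaysInMonth_alt year
instance (year : Int) (out : List Int) : Decidable (Spec_getFirstDaysInMonth year out) := by unfold Spec_getFirstDaysInMonth; infer_instance

-- ===== CLAIM (what is proved, stated in full; the proofs are below) =====
def Claim_equal_getFirstDaysInMonth : Prop := ∀ (year : Int), Dom_getFirstDaysInMonth year → Spec_getFirstDaysInMonth year (getFirstDaysInMonth year)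

-- ===== LEMMAS AND PROOFS =====

-- Once the leap bit is fixed, both programs are closed computations with the same value.
set_option maxRecDepth 10000 in
theorem portA_of_leap (year : Int) (b : Bool) (h : isLeapYear year = b) :
    getFirstDaysInMonth year =
      (if b then [1, 32, 61, 92, 122, 153, 183, 214, 245, 275, 306, 336]
       else [1, 32, 60, 91, 121, 152, 182, 213, 244, 274, 305, 335]) := by
  cases b <;> simp [getFirstDaysInMonth, daysInMonth, h, PySem.List.pyRange] <;> rfl

theorem portB_of_leap (year : Int) (b : Bool) (h : isLeapYear year = b) :
    getFirstDaysInMonth_alt year =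
      (if b then [1, 32, 61, 92, 122, 153, 183, 214, 245, 275, 306, 336]
       else [1, 32, 60, 91, 121, 152, 182, 213, 244, 274, 305, 335]) := by
  cases b <;> simp [getFirstDaysInMonth_alt, daysInMonth, h, PySem.List.pyRange] <;> rfl

-- ===== VERDICT (by name: the statement is the Claim_ definition above) =====
theorem getFirstDaysInMonth_spec : Claim_equal_getFirstDaysInMonth := by
  intro year _
  unfold Spec_getFirstDaysInMonth
  rw [portA_of_leap year (isLeapYear year) rfl, portB_of_leap year (isLeapYear year) rfl]
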